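-- pv_equiv track=rewrite | github.com/t34-dev/youtube-download-speed-test | video_format_utils.py | get_optimal_format
-- ===== SOURCE A (Python) =====
-- def get_optimal_format(codec, resolution):
--     # Normalize input data
--     codec = codec.lower()
--     resolution = resolution.lower()
--
--     # Dictionary mapping codecs to their preferred formats
--     codec_format_map = {
--         'av01': 'mp4',
--         'avc1': 'mp4',
--         'vp09': 'webm',
--         'mp4a': 'mp4',
--     }
--
--     # Special cases
--     if 'avc1' in codec and resolution in ['360p', '480p']:
--         return 'mp4'
--
--     # Look for the codec in the dictionary
--     for key in codec_format_map:
--         if key in codec: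
--             return codec_format_map[key]
--
--     # If codec not found, return mp4 as the most universal format
--     return 'mp4'
-- ===== SOURCE B (Python) =====
-- def get_optimal_format(codec, resolution):
--     codec = codec.lower()
--     resolution = resolution.lower()
--     # Single closed-form decision: only vp09 (without an earlier av01/avc1 match) yields webm.
--     return 'webm' if ('vp09' in codec and 'av01' not in codec and 'avc1' not in codec) else 'mp4'
-- ===== Notes on version B (the rewrite author's own statement) =====
-- stated objective: simpler
-- what changed: Replaces the codec->format dictionary, the first-match substring loop and the redundant avc1/resolution special case by a single closed-form boolean expression returning 'webm' exactly when 'vp09' occurs without 'av01'/'avc1'.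
import Mathlib
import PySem

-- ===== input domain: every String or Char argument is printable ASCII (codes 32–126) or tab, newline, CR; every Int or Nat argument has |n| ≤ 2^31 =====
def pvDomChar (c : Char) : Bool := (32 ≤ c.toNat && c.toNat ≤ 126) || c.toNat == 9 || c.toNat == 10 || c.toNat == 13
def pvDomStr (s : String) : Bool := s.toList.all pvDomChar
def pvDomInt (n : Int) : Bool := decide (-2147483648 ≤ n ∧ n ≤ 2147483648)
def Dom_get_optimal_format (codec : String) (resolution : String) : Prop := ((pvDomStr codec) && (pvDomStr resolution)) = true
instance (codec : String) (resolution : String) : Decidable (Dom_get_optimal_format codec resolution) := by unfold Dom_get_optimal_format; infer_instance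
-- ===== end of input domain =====

-- B replaces A's dict + first-match loop + redundant special case by one closed-form boolean (simpler, same result).
-- ===== PORT A =====
def pvDictLit : PySem.Dict String String :=
  ((((PySem.Dict.empty).insert "av01" "mp4").insert "avc1" "mp4").insert "vp09" "webm").insert "mp4a" "mp4"

-- the 'for key in codec_format_map: if key in codec: return codec_format_map[key]' loop
def pvLoopA (codec : String) (m : PySem.Dict String String) : List String → String
  | [] => "mp4"
  | k :: ks => if PySem.Str.isIn k codec then m.getD k "mp4" else pvLoopA codec m ks

def get_optimal_format (codec : String) (resolution : String) : String :=
  let codec := PySem.Str.lower codec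
  let resolution := PySem.Str.lower resolution
  let codec_format_map : PySem.Dict String String := pvDictLit
  if PySem.Str.isIn "avc1" codec && (resolution == "360p" || resolution == "480p") then "mp4"
  else pvLoopA codec codec_format_map codec_format_map.keys

-- ===== PORT B =====
def get_optimal_format_alt (codec : String) (resolution : String) : String :=
  let codec := PySem.Str.lower codec
  let _resolution := PySem.Str.lower resolution
  if PySem.Str.isIn "vp09" codec && !PySem.Str.isIn "av01" codec && !PySem.Str.isIn "avc1" codec
  then "webm" else "mp4"

-- ===== PRECONDITION & SPEC =====
def Spec_get_optimal_format (codec : String) (resolution : String) (out : String) : Prop := out = get_optimal_format_alt codec resolution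
instance (codec : String) (resolution : String) (out : String) : Decidable (Spec_get_optimal_format codec resolution out) := by unfold Spec_get_optimal_format; infer_instance

-- ===== CLAIM (what is proved, stated in full; the proofs are below) =====
def Claim_equal_get_optimal_format : Prop := ∀ (codec : String) (resolution : String), Dom_get_optimal_format codec resolution → Spec_get_optimal_format codec resolution (get_optimal_format codec resolution)

-- ===== LEMMAS AND PROOFS =====


theorem pvKeys_eq : pvDictLit.keys = ["av01", "avc1", "vp09", "mp4a"] := by decide

theorem pvLoop_eq (c : String) :
    pvLoopA c pvDictLit ["av01", "avc1", "vp09", "mp4a"] =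
      if PySem.Str.isIn "av01" c then "mp4"
      else if PySem.Str.isIn "avc1" c then "mp4"
      else if PySem.Str.isIn "vp09" c then "webm"
      else if PySem.Str.isIn "mp4a" c then "mp4"
      else "mp4" := by
  have g1 : pvDictLit.getD "av01" "mp4" = "mp4" := by decide
  have g2 : pvDictLit.getD "avc1" "mp4" = "mp4" := by decide
  have g3 : pvDictLit.getD "vp09" "mp4" = "webm" := by decide
  have g4 : pvDictLit.getD "mp4a" "mp4" = "mp4" := by decide
  simp only [pvLoopA, g1, g2, g3, g4]

-- ===== VERDICT (by name: the statement is the Claim_ definition above) =====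
theorem get_optimal_format_spec : Claim_equal_get_optimal_format := by
  intro codec resolution _
  unfold Spec_get_optimal_format get_optimal_format get_optimal_format_alt
  simp only [pvKeys_eq, pvLoop_eq]
  by_cases h1 : PySem.Chars.isIn ['a','v','0','1'] (PySem.Chars.lower codec.toList) = true <;>
  by_cases h2 : PySem.Chars.isIn ['a','v','c','1'] (PySem.Chars.lower codec.toList) = true <;>
  by_cases h3 : PySem.Chars.isIn ['v','p','0','9'] (PySem.Chars.lower codec.toList) = true <;>
  simp [h1, h2, h3]
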